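-- pv_equiv track=rewrite | github.com/poruru-code/esb | tools/cli/deploy_ops.py | dockerfile_logical_lines
-- ===== SOURCE A (Python) =====
-- def dockerfile_logical_lines(dockerfile: str) -> list[str]:
--     raw_lines = dockerfile.split("\n")
--     lines: list[str] = []
--     current: list[str] = []
--     for raw in raw_lines:
--         trimmed_right = raw.rstrip(" \t\r")
--         continued = trimmed_right.endswith("\\")
--         part = trimmed_right[:-1] if continued else trimmed_right
--         part = part.rstrip(" \t")
--         if current:
--             current.append(" ")
--         current.append(part)
--         if continued:
--             continue
--         lines.append("".join(current))
--         current = []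
--     if current:
--         lines.append("".join(current))
--     return lines
-- ===== SOURCE B (Python) =====
-- def _process(raw):
--     trimmed_right = raw.rstrip(" \t\r")
--     continued = trimmed_right.endswith("\\")
--     part = trimmed_right[:-1] if continued else trimmed_right
--     return part.rstrip(" \t"), continued
--
--
-- def dockerfile_logical_lines(dockerfile: str) -> list[str]:
--     raw_lines = dockerfile.split("\n")
--     n = len(raw_lines)
--     lines: list[str] = []
--     i = 0
--     while i < n:
--         parts: list[str] = []
--         while True:
--             part, continued = _process(raw_lines[i])
--             parts.append(part)
--             i += 1
--             if not continued or i >= n: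
--                 break
--         lines.append(" ".join(parts))
--     return lines
-- ===== Notes on version B (the rewrite author's own statement) =====
-- stated objective: alternative
-- what changed: Replaced the flat single-pass accumulator loop (building a chunk list and flushing it on non-continued lines and at EOF) with a nested traversal: an outer while-loop per logical line whose inner loop collects the continuation run's parts and joins them with a single space.
import Mathlib
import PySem

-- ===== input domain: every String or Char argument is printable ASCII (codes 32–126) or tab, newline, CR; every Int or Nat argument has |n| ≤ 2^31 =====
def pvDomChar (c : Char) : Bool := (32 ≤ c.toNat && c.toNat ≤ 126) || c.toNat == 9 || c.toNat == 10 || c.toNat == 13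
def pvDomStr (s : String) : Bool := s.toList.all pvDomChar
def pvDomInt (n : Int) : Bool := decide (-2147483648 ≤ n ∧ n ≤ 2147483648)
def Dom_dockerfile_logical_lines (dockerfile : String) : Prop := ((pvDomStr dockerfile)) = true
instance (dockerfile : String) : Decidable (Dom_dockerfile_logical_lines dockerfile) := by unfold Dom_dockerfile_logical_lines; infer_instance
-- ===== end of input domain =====

-- B rewrites A's flat accumulator-and-flush pass as an outer loop per logical line with an
-- inner loop over its continuation run joined by single spaces; same cost, different decomposition.

-- ===== PORT A =====

-- str.rstrip(chars): drop the given characters from the right end (hand port, exact).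
def pvRstrip (cs : List Char) (chars : List Char) : List Char :=
  (cs.reverse.dropWhile (fun c => c ∈ chars)).reverse

-- the body of A's for-loop over raw lines; state = (lines, current)
def pvStepA (st : List (List Char) × List (List Char)) (raw : List Char) :
    List (List Char) × List (List Char) :=
  let trimmed := pvRstrip raw [' ', '\t', '\r']
  let continued := PySem.Chars.endswith trimmed ['\\']
  let part0 := if continued then PySem.Chars.slice trimmed none (some (-1)) else trimmed
  let part := pvRstrip part0 [' ', '\t']
  let cur := (if st.2.isEmpty then st.2 else st.2 ++ [[' ']]) ++ [part]
  if continued then (st.1, cur) else (st.1 ++ [PySem.Chars.join [] cur], [])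

-- the trailing 'if current: lines.append("".join(current))'
def pvFlushA (st : List (List Char) × List (List Char)) : List (List Char) :=
  if st.2.isEmpty then st.1 else st.1 ++ [PySem.Chars.join [] st.2]

def dockerfile_logical_lines (dockerfile : String) : List String :=
  let raw_lines := PySem.Chars.splitOn dockerfile.toList ['\n']
  (pvFlushA (raw_lines.foldl pvStepA ([], []))).map String.mk

-- ===== PORT B =====

-- Source B's helper _process(raw): (part, continued)
def pvProcess (raw : List Char) : List Char × Bool :=
  let trimmed := pvRstrip raw [' ', '\t', '\r']
  let continued := PySem.Chars.endswith trimmed ['\\']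
  let part0 := if continued then PySem.Chars.slice trimmed none (some (-1)) else trimmed
  (pvRstrip part0 [' ', '\t'], continued)

-- Source B's inner while-loop: collect the parts of one continuation run, return (parts, rest)
def pvRun : List Char → List (List Char) → (List (List Char)) × (List (List Char))
  | raw, rest =>
    let pc := pvProcess raw
    if pc.2 then
      match rest with
      | [] => ([pc.1], [])
      | r :: rs =>
        let pr := pvRun r rs
        (pc.1 :: pr.1, pr.2)
    else ([pc.1], rest)

theorem pvRun_snd_le (raw : List Char) (rest : List (List Char)) :
    (pvRun raw rest).2.length ≤ rest.length := by
  induction rest generalizing raw with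
  | nil => simp [pvRun]
  | cons r rs ih =>
    simp only [pvRun]
    split
    · exact Nat.le_succ_of_le (ih r)
    · exact Nat.le_refl _

-- Source B's outer while-loop over raw_lines
def pvLines : List (List Char) → List (List Char)
  | [] => []
  | raw :: rest =>
    PySem.Chars.join [' '] (pvRun raw rest).1 :: pvLines (pvRun raw rest).2
termination_by l => l.length
decreasing_by simpa using Nat.lt_succ_of_le (pvRun_snd_le raw rest)

def dockerfile_logical_lines_alt (dockerfile : String) : List String :=
  let raw_lines := PySem.Chars.splitOn dockerfile.toList ['\n']
  (pvLines raw_lines).map String.mk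

-- ===== PRECONDITION & SPEC =====
def Spec_dockerfile_logical_lines (dockerfile : String) (out : List String) : Prop := out = dockerfile_logical_lines_alt dockerfile
instance (dockerfile : String) (out : List String) : Decidable (Spec_dockerfile_logical_lines dockerfile out) := by unfold Spec_dockerfile_logical_lines; infer_instance

-- ===== CLAIM (what is proved, stated in full; the proofs are below) =====
def Claim_equal_dockerfile_logical_lines : Prop := ∀ (dockerfile : String), Dom_dockerfile_logical_lines dockerfile → Spec_dockerfile_logical_lines dockerfile (dockerfile_logical_lines dockerfile)

-- ===== LEMMAS AND PROOFS =====

-- A's loop, rephrased with the accumulated joined string (none = current is empty)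
def pvGoA : List (List Char) → Option (List Char) → List (List Char)
  | [], none => []
  | [], some s => [s]
  | raw :: rest, s? =>
    let pc := pvProcess raw
    let s' := match s? with | none => pc.1 | some s => s ++ ' ' :: pc.1
    if pc.2 then pvGoA rest (some s') else s' :: pvGoA rest none

theorem pvFlatten_intersperse_nil : ∀ (l : List (List Char)),
    (List.intersperse ([] : List Char) l).flatten = l.flatten
  | [] => rfl
  | [_] => rfl
  | a :: b :: t => by
    rw [List.intersperse_cons₂, List.flatten_cons, List.flatten_cons,
      pvFlatten_intersperse_nil (b :: t)]
    simp

theorem pvJoin_nil_flatten (l : List (List Char)) :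
    PySem.Chars.join [] l = l.flatten := by
  simp [PySem.Chars.join, List.intercalate, pvFlatten_intersperse_nil]

theorem pvStepA_eq_process (st : (List (List Char)) × (List (List Char))) (raw : List Char) :
    pvStepA st raw =
      (let pc := pvProcess raw
       let cur := (if st.2.isEmpty then st.2 else st.2 ++ [[' ']]) ++ [pc.1]
       if pc.2 then (st.1, cur) else (st.1 ++ [PySem.Chars.join [] cur], [])) := rfl

theorem pvFold_eq_goA (L : List (List Char)) (lines cur : List (List Char)) :
    pvFlushA (L.foldl pvStepA (lines, cur)) =
      lines ++ pvGoA L (if cur.isEmpty then none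
                        else some (PySem.Chars.join [] cur)) := by
  induction L generalizing lines cur with
  | nil =>
    cases cur <;> simp [pvFlushA, pvGoA]
  | cons raw L ih =>
    rw [List.foldl_cons, pvStepA_eq_process]
    by_cases hc : (pvProcess raw).2
    · simp only [hc, if_true]
      rw [ih]
      cases cur with
      | nil =>
        simp [pvGoA, hc]
      | cons c cs =>
        simp [pvGoA, hc, pvJoin_nil_flatten]
    · rw [if_neg hc, ih]
      cases cur with
      | nil =>
        simp [pvGoA, hc]
      | cons c cs =>
        simp [pvGoA, hc, pvJoin_nil_flatten]

theorem pvRun_fst_ne_nil (raw : List Char) (rest : List (List Char)) :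
    (pvRun raw rest).1 ≠ [] := by
  cases rest <;> simp only [pvRun] <;> split <;> simp

theorem pvGoA_cons (raw : List Char) (rest : List (List Char)) (s? : Option (List Char)) :
    pvGoA (raw :: rest) s? =
      (match s? with
       | none => PySem.Chars.join [' '] (pvRun raw rest).1
       | some s => s ++ ' ' :: PySem.Chars.join [' '] (pvRun raw rest).1) ::
        pvGoA (pvRun raw rest).2 none := by
  induction rest generalizing raw s? with
  | nil =>
    cases s? <;>
      simp [pvGoA, pvRun, PySem.Chars.join_singleton]
  | cons r rs ih =>
    by_cases hc : (pvProcess raw).2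
    · obtain ⟨q, qs, hq⟩ := List.exists_cons_of_ne_nil (pvRun_fst_ne_nil r rs)
      have hjoin : PySem.Chars.join [' '] ((pvProcess raw).1 :: (pvRun r rs).1) =
          (pvProcess raw).1 ++ ' ' :: PySem.Chars.join [' '] (pvRun r rs).1 := by
        rw [hq, PySem.Chars.join_cons_cons]; simp
      have hrun : pvRun raw (r :: rs) = ((pvProcess raw).1 :: (pvRun r rs).1, (pvRun r rs).2) := by
        simp only [pvRun, hc, if_true]
      have hgo : pvGoA (raw :: r :: rs) s? =
          pvGoA (r :: rs) (some (match s? with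
            | none => (pvProcess raw).1
            | some s => s ++ ' ' :: (pvProcess raw).1)) := by
        cases s? <;> simp [pvGoA, hc]
      rw [hgo, ih, hrun]
      cases s? <;> simp [hjoin]
    · cases s? <;> simp [pvGoA, pvRun, hc, PySem.Chars.join_singleton]

theorem pvGoA_eq_pvLines : ∀ (L : List (List Char)), pvGoA L none = pvLines L
  | [] => by rw [pvLines]; rfl
  | raw :: rest => by
    rw [pvGoA_cons raw rest none, pvGoA_eq_pvLines (pvRun raw rest).2, pvLines]
termination_by L => L.length
decreasing_by simpa using Nat.lt_succ_of_le (pvRun_snd_le raw rest)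

-- ===== VERDICT (by name: the statement is the Claim_ definition above) =====
theorem dockerfile_logical_lines_spec : Claim_equal_dockerfile_logical_lines := by
  intro d _
  have h := pvFold_eq_goA (PySem.Chars.splitOn d.toList ['\n']) [] []
  simp only [List.isEmpty_nil, if_true, List.nil_append] at h
  unfold Spec_dockerfile_logical_lines dockerfile_logical_lines dockerfile_logical_lines_alt
  simp only [h, pvGoA_eq_pvLines]
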